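-- pv_equiv track=rewrite | github.com/yoshiayu/sekigae | src/seating.py | _find_duplicate_row_identities
-- ===== SOURCE A (Python) =====
-- import unicodedata
-- from collections import Counter, defaultdict
-- from typing import Any
--
-- def _normalize_identity_text(value: str) -> str:
--     normalized = unicodedata.normalize("NFKC", value or "")
--     compact = normalized.strip().replace("　", " ").replace(" ", "")
--     return compact.lower()
--
-- def _row_identity_key(row: dict[str, Any]) -> tuple[str, str]:
--     return (
--         _normalize_identity_text(str(row.get("name", ""))),
--         _normalize_identity_text(str(row.get("company", ""))),
--     )
--
-- def _find_duplicate_row_identities(rows: list[dict[str, Any]]) -> list[str]: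
--     counter: Counter[tuple[str, str]] = Counter()
--     display: dict[tuple[str, str], tuple[str, str]] = {}
--     for row in rows:
--         identity_key = _row_identity_key(row)
--         counter[identity_key] += 1
--         if identity_key not in display:
--             display[identity_key] = (
--                 str(row.get("name", "")).strip(),
--                 str(row.get("company", "")).strip(),
--             )
--
--     duplicates: list[str] = []
--     for identity_key, count in counter.items():
--         if count <= 1:
--             continue
--         name, company = display.get(identity_key, ("", ""))
--         duplicates.append(f"{name} ({company}) x{count}")
--     duplicates.sort()
--     return duplicates
-- ===== SOURCE B (Python) =====
-- import unicodedata
--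
--
-- def _normalize_identity_text(value: str) -> str:
--     normalized = unicodedata.normalize("NFKC", value or "")
--     compact = normalized.strip().replace("\u3000", " ").replace(" ", "")
--     return compact.lower()
--
--
-- def _row_identity_key(row):
--     return (
--         _normalize_identity_text(str(row.get("name", ""))),
--         _normalize_identity_text(str(row.get("company", ""))),
--     )
--
--
-- def _find_duplicate_row_identities(rows):
--     # Sort the rows with a STABLE sort keyed on the normalized identity, then
--     # scan consecutive runs of equal keys: a run longer than 1 is a duplicate
--     # group, and (by stability) the run's first row is the first occurrence.
--     ordered = sorted(rows, key=_row_identity_key)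
--     duplicates = []
--     while ordered:
--         head = ordered[0]
--         key = _row_identity_key(head)
--         rest = ordered[1:]
--         run = 0
--         while run < len(rest) and _row_identity_key(rest[run]) == key:
--             run += 1
--         if run + 1 > 1:
--             name = str(head.get("name", "")).strip()
--             company = str(head.get("company", "")).strip()
--             duplicates.append(f"{name} ({company}) x{run + 1}")
--         ordered = rest[run:]
--     duplicates.sort()
--     return duplicates
-- ===== Notes on version B (the rewrite author's own statement) =====
-- stated objective: alternative
-- what changed: Replaces A's hash aggregation (Counter + first-seen display dict, then an items() pass) by a stable sort of the rows on the normalized identity key followed by a single scan over consecutive runs of equal keys (run length = count, run head = first occurrence by stability).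
import Mathlib
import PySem

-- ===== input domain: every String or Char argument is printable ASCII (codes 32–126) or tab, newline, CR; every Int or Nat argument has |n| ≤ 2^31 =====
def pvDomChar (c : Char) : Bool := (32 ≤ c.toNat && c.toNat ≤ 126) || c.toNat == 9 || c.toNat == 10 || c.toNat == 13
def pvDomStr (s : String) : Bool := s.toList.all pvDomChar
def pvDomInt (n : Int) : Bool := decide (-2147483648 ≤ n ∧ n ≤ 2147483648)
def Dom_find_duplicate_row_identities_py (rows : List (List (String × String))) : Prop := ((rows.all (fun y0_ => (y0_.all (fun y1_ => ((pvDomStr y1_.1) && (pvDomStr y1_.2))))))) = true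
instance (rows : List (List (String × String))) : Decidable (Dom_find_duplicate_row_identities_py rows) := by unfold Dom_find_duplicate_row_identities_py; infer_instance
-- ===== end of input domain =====

-- B replaces A's hash aggregation (Counter + first-seen display dict + items() pass) by a
-- stable sort of the rows on the normalized identity key followed by one scan over
-- consecutive runs of equal keys (objective: alternative).
-- Shared module helpers (_normalize_identity_text, _row_identity_key, row.get, the stripped
-- display fields, the f-string format) are ported once and used by both ports, as in the
-- Python module.  unicodedata.normalize("NFKC", ·) is the identity on the ASCII domain Dom_,
-- so it is ported as the identity (exact on Dom_).

-- row.get(k, "")  (dict → association list, first match)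
def pvGet (row : List (String × String)) (k : String) : String :=
  (PySem.Dict.mk row).getD k ""

-- _normalize_identity_text: strip, replace "　"→" ", replace " "→"", lower (NFKC = id on ASCII)
def pvNorm (s : String) : String :=
  PySem.Str.lower (PySem.Str.replace (PySem.Str.replace (PySem.Str.strip s) "　" " ") " " "")

-- _row_identity_key
def pvKey (row : List (String × String)) : String × String :=
  (pvNorm (pvGet row "name"), pvNorm (pvGet row "company"))

-- the stripped display pair stored by A / emitted by B
def pvDisp (row : List (String × String)) : String × String :=
  (PySem.Str.strip (pvGet row "name"), PySem.Str.strip (pvGet row "company"))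

-- f"{name} ({company}) x{count}"
def pvFmt (d : String × String) (c : Int) : String :=
  d.1 ++ " (" ++ d.2 ++ ") x" ++ PySem.Int.toStr c

-- ===== PORT A =====
def find_duplicate_row_identities_py (rows : List (List (String × String))) : List String :=
  let st := rows.foldl
    (fun (st : PySem.Dict (String × String) Int × PySem.Dict (String × String) (String × String)) row =>
      let k := pvKey row
      let counter := st.1.modify k 0 (· + 1)
      let display := if st.2.contains k = false then st.2.insert k (pvDisp row) else st.2
      (counter, display))
    (PySem.Dict.empty, PySem.Dict.empty)
  let duplicates := st.1.items.foldl
    (fun (acc : List String) kv =>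
      if kv.2 ≤ 1 then acc else acc ++ [pvFmt (st.2.getD kv.1 ("", "")) kv.2]) []
  PySem.List.sorted duplicates (fun x => x) false

-- ===== PORT B =====
-- the outer while loop of B: scan the (already key-sorted) rows run by run
def pvRunsB : List (List (String × String)) → List String
  | [] => []
  | r :: rest =>
    let t := rest.takeWhile (fun x => pvKey x == pvKey r)
    (if (1 : Int) < (t.length : Int) + 1 then [pvFmt (pvDisp r) ((t.length : Int) + 1)] else [])
      ++ pvRunsB (rest.dropWhile (fun x => pvKey x == pvKey r))
  termination_by l => l.length
  decreasing_by
    simp only [List.length_cons]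
    exact Nat.lt_succ_of_le (List.length_dropWhile_le _ _)

def find_duplicate_row_identities_py_alt (rows : List (List (String × String))) : List String :=
  let ordered := PySem.List.sorted2 rows (fun r => (pvKey r).1) (fun r => (pvKey r).2) false
  PySem.List.sorted (pvRunsB ordered) (fun x => x) false

-- ===== PRECONDITION & SPEC =====
def Spec_find_duplicate_row_identities_py (rows : List (List (String × String))) (out : List String) : Prop := out = find_duplicate_row_identities_py_alt rows
instance (rows : List (List (String × String))) (out : List String) : Decidable (Spec_find_duplicate_row_identities_py rows out) := by unfold Spec_find_duplicate_row_identities_py; infer_instance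

-- ===== CLAIM (what is proved, stated in full; the proofs are below) =====
def Claim_equal_find_duplicate_row_identities_py : Prop := ∀ (rows : List (List (String × String))), Dom_find_duplicate_row_identities_py rows → Spec_find_duplicate_row_identities_py rows (find_duplicate_row_identities_py rows)

-- ===== LEMMAS AND PROOFS =====

-- the identity key viewed in the lexicographic linear order on pairs of strings
abbrev pvG (r : List (String × String)) : Lex (String × String) := toLex (pvKey r)

-- the contribution of one identity k to the duplicate list
def pvEmitAt (keys : List (String × String)) (rows : List (List (String × String)))
    (k : String × String) : List String :=
  if 1 < ((keys.count k : Int)) then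
    [pvFmt ((rows.find? (fun r => pvKey r == k)).elim ("", "") pvDisp) (keys.count k : Int)]
  else []

-- B's sorted2 on the two key components is insertion sort keyed by the lexicographic order
theorem pv_sorted2_eq (rows : List (List (String × String))) :
    PySem.List.sorted2 rows (fun r => (pvKey r).1) (fun r => (pvKey r).2) false
      = PySem.List.sorted rows pvG false := by
  have hbf : (fun (a b : List (String × String)) =>
        decide ((pvKey a).1 < (pvKey b).1)
          || (!decide ((pvKey b).1 < (pvKey a).1) && decide ((pvKey a).2 < (pvKey b).2)))
      = (fun a b => decide (pvG a < pvG b)) := by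
    funext a b
    rcases lt_trichotomy ((pvKey a).1) ((pvKey b).1) with h | h | h
    · simp [pvG, Prod.Lex.lt_iff, h]
    · simp [pvG, Prod.Lex.lt_iff, h]
    · simp [pvG, Prod.Lex.lt_iff, h, lt_asymm h, (ne_of_gt h)]
  unfold PySem.List.sorted2 PySem.List.sorted
  simp only [Bool.false_eq_true, if_false, hbf]

-- ----- generic stability of PySem's insertion sort (filter by one key value) -----

theorem pv_pairwise_insertBy {α κ : Type} [LinearOrder κ] (key : α → κ) (x : α) (acc : List α)
    (h : acc.Pairwise (fun a b => key a ≤ key b)) :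
    (PySem.List.insertBy (fun a b => decide (key a < key b)) x acc).Pairwise
      (fun a b => key a ≤ key b) := by
  induction acc with
  | nil =>
    rw [show PySem.List.insertBy (fun a b => decide (key a < key b)) x [] = [x] from rfl]
    exact List.pairwise_singleton _ _
  | cons y ys ih =>
    rcases List.pairwise_cons.mp h with ⟨h1, h2⟩
    rw [show PySem.List.insertBy (fun a b => decide (key a < key b)) x (y :: ys)
        = if decide (key x < key y) then x :: y :: ys
          else y :: PySem.List.insertBy (fun a b => decide (key a < key b)) x ys from rfl]
    by_cases hb : key x < key y
    · rw [if_pos (by simpa using hb)]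
      refine List.pairwise_cons.mpr ⟨?_, h⟩
      intro z hz
      rcases List.mem_cons.mp hz with hz | hz
      · exact hz ▸ le_of_lt hb
      · exact (le_of_lt hb).trans (h1 z hz)
    · rw [if_neg (by simpa using hb)]
      refine List.pairwise_cons.mpr ⟨?_, ih h2⟩
      intro z hz
      rcases (PySem.List.mem_insertBy _ _ _ _).mp hz with hz | hz
      · exact hz ▸ le_of_not_gt hb
      · exact h1 z hz

theorem pv_filter_insertBy {α κ : Type} [LinearOrder κ] (key : α → κ) (v : κ) (x : α)
    (acc : List α) (h : acc.Pairwise (fun a b => key a ≤ key b)) :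
    (PySem.List.insertBy (fun a b => decide (key a < key b)) x acc).filter
        (fun y => decide (key y = v))
      = acc.filter (fun y => decide (key y = v)) ++ (if key x = v then [x] else []) := by
  induction acc with
  | nil =>
    rw [show PySem.List.insertBy (fun a b => decide (key a < key b)) x [] = [x] from rfl]
    by_cases hv : key x = v <;> simp [hv]
  | cons y ys ih =>
    rcases List.pairwise_cons.mp h with ⟨h1, h2⟩
    rw [show PySem.List.insertBy (fun a b => decide (key a < key b)) x (y :: ys)
        = if decide (key x < key y) then x :: y :: ys
          else y :: PySem.List.insertBy (fun a b => decide (key a < key b)) x ys from rfl]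
    by_cases hb : key x < key y
    · rw [if_pos (by simpa using hb)]
      by_cases hv : key x = v
      · have hnil : (y :: ys).filter (fun z => decide (key z = v)) = [] := by
          apply List.filter_eq_nil_iff.mpr
          intro z hz
          have hzge : key y ≤ key z := by
            rcases List.mem_cons.mp hz with hz | hz
            · exact hz ▸ le_refl _
            · exact h1 z hz
          have : v < key z := hv ▸ lt_of_lt_of_le hb hzge
          simp [ne_of_gt this]
        rw [List.filter_cons_of_pos (by simpa using hv), hnil, if_pos hv]
        rfl
      · rw [List.filter_cons_of_neg (by simpa using hv), if_neg hv, List.append_nil]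
    · rw [if_neg (by simpa using hb)]
      rw [List.filter_cons, List.filter_cons, ih h2]
      by_cases hy : key y = v
      · simp [hy]
      · simp [hy]

theorem pv_sorted_filter {α κ : Type} [LinearOrder κ] (key : α → κ) (v : κ) (xs : List α) :
    (PySem.List.sorted xs key false).filter (fun y => decide (key y = v))
      = xs.filter (fun y => decide (key y = v)) := by
  rw [PySem.List.sorted_eq_foldl_insertBy]
  suffices h : ∀ (l : List α) (acc : List α), acc.Pairwise (fun a b => key a ≤ key b) →
      (l.foldl (fun acc x => PySem.List.insertBy (fun a b => decide (key a < key b)) x acc) acc).filter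
          (fun y => decide (key y = v))
        = acc.filter (fun y => decide (key y = v)) ++ l.filter (fun y => decide (key y = v)) by
    simpa using h xs [] List.Pairwise.nil
  intro l
  induction l with
  | nil => intro acc _; simp
  | cons x xs2 ih =>
    intro acc hacc
    rw [List.foldl_cons, ih _ (pv_pairwise_insertBy key x acc hacc),
      pv_filter_insertBy key v x acc hacc, List.append_assoc, List.filter_cons]
    by_cases hv : key x = v
    · simp [hv]
    · simp [hv]

-- ----- characterisation of the run scan on a key-sorted list -----

theorem pv_flatMap_congr {α β : Type} (l : List α) (f g : α → List β)
    (h : ∀ x ∈ l, f x = g x) : l.flatMap f = l.flatMap g := by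
  induction l with
  | nil => rfl
  | cons x xs ih =>
    simp only [List.flatMap_cons, h x (by simp), ih (fun y hy => h y (by simp [hy]))]

theorem pv_discard_eq_self (s : List (String × String)) (k : String × String)
    (h : ∀ x ∈ s, x ≠ k) : PySem.Set.discard s k = s := by
  show List.filter (fun y => !(y == k)) s = s
  apply List.filter_eq_self.mpr
  intro x hx
  simpa using h x hx

theorem pv_ofList_discard : ∀ (l1 l2 : List (String × String)) (k : String × String),
    (∀ x ∈ l1, x = k) → (∀ x ∈ l2, x ≠ k) →
    PySem.Set.discard (PySem.Set.ofList (l1 ++ l2)) k = PySem.Set.ofList l2 := by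
  intro l1
  induction l1 with
  | nil =>
    intro l2 k _ h2
    exact pv_discard_eq_self _ k (fun x hx => h2 x ((PySem.Set.mem_ofList l2 x).mp hx))
  | cons a l1' ih =>
    intro l2 k h1 h2
    have ha : a = k := h1 a (by simp)
    subst ha
    rw [List.cons_append, PySem.Set.ofList_cons]
    show List.filter (fun y => !(y == a))
        (a :: List.filter (fun y => !(y == a)) (PySem.Set.ofList (l1' ++ l2)))
      = PySem.Set.ofList l2
    rw [List.filter_cons_of_neg (by simp), List.filter_filter]
    have hff : (fun (y : String × String) => !(y == a) && !(y == a)) = fun y => !(y == a) := by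
      funext y; rw [Bool.and_self]
    rw [hff]
    exact ih l2 a (fun x hx => h1 x (by simp [hx])) h2

set_option maxHeartbeats 4000000 in
theorem pv_runs_eq_aux : ∀ (n : Nat) (s : List (List (String × String))), s.length ≤ n →
    s.Pairwise (fun a b => pvG a ≤ pvG b) →
    pvRunsB s = (PySem.Set.ofList (s.map pvKey)).flatMap (pvEmitAt (s.map pvKey) s) := by
  intro n
  induction n with
  | zero =>
    intro s hlen _
    have hnil : s = [] := List.length_eq_zero_iff.mp (Nat.le_zero.mp hlen)
    subst hnil
    simp [pvRunsB, PySem.Set.ofList]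
  | succ n ih =>
    intro s hlen hp
    cases s with
    | nil => simp [pvRunsB, PySem.Set.ofList]
    | cons r rest =>
      rcases List.pairwise_cons.mp hp with ⟨h1, h2⟩
      have hrest : rest.takeWhile (fun x => pvKey x == pvKey r)
          ++ rest.dropWhile (fun x => pvKey x == pvKey r) = rest := List.takeWhile_append_dropWhile
      have htk : ∀ x ∈ rest.takeWhile (fun x => pvKey x == pvKey r), pvKey x = pvKey r := by
        intro x hx
        have hb : (fun x => pvKey x == pvKey r) x = true :=
          @List.mem_takeWhile_imp _ (fun x => pvKey x == pvKey r) rest x hx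
        exact eq_of_beq hb
      have hdsub : (rest.dropWhile (fun x => pvKey x == pvKey r)).Sublist rest :=
        List.dropWhile_sublist _
      have hdp : (rest.dropWhile (fun x => pvKey x == pvKey r)).Pairwise
          (fun a b => pvG a ≤ pvG b) := h2.sublist hdsub
      have hd : ∀ x ∈ rest.dropWhile (fun x => pvKey x == pvKey r), pvKey x ≠ pvKey r := by
        cases hdd : rest.dropWhile (fun x => pvKey x == pvKey r) with
        | nil => intro x hx; cases hx
        | cons y d' =>
          have hpy : (pvKey y == pvKey r) = false := by
            have hh := List.head?_dropWhile_not (fun x => pvKey x == pvKey r) rest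
            rw [hdd] at hh
            simpa using hh
          have hky : pvKey y ≠ pvKey r := by simpa using hpy
          have hymem : y ∈ rest := (List.dropWhile_sublist _).subset (by rw [hdd]; simp)
          have hry : pvG r < pvG y := lt_of_le_of_ne (h1 y hymem) (fun he => hky (toLex_inj.mp he.symm))
          intro x hx
          rcases List.mem_cons.mp hx with hx | hx
          · exact hx ▸ hky
          · have hyx : pvG y ≤ pvG x := (List.pairwise_cons.mp (hdd ▸ hdp)).1 x hx
            have hrx : pvG r < pvG x := lt_of_lt_of_le hry hyx
            intro he
            exact hrx.ne (congrArg toLex he.symm)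
      have hkeys_eq : (r :: rest).map pvKey
          = pvKey r :: ((rest.takeWhile (fun x => pvKey x == pvKey r)).map pvKey
              ++ (rest.dropWhile (fun x => pvKey x == pvKey r)).map pvKey) := by
        rw [List.map_cons, ← List.map_append, hrest]
      have hofl : PySem.Set.ofList ((r :: rest).map pvKey)
          = pvKey r :: PySem.Set.ofList ((rest.dropWhile (fun x => pvKey x == pvKey r)).map pvKey) := by
        rw [hkeys_eq, PySem.Set.ofList_cons, pv_ofList_discard _ _ (pvKey r)
          (by intro x hx; rcases List.mem_map.mp hx with ⟨z, hz, rfl⟩; exact htk z hz)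
          (by intro x hx; rcases List.mem_map.mp hx with ⟨z, hz, rfl⟩; exact hd z hz)]
      have hcnt_r : ((r :: rest).map pvKey).count (pvKey r)
          = (rest.takeWhile (fun x => pvKey x == pvKey r)).length + 1 := by
        rw [hkeys_eq, List.count_cons_self, List.count_append]
        rw [List.count_eq_length.mpr
          (by intro b hb; rcases List.mem_map.mp hb with ⟨z, hz, rfl⟩; exact (htk z hz).symm)]
        rw [List.count_eq_zero.mpr
          (by intro hm; rcases List.mem_map.mp hm with ⟨z, hz, hzz⟩; exact hd z hz hzz)]
        simp
      have hfind_r : (r :: rest).find? (fun x => pvKey x == pvKey r) = some r :=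
        List.find?_cons_of_pos (by simp)
      have hemit_r : pvEmitAt ((r :: rest).map pvKey) (r :: rest) (pvKey r)
          = (if (1 : Int) < ((rest.takeWhile (fun x => pvKey x == pvKey r)).length : Int) + 1 then
              [pvFmt (pvDisp r) (((rest.takeWhile (fun x => pvKey x == pvKey r)).length : Int) + 1)]
            else []) := by
        unfold pvEmitAt
        rw [hcnt_r, hfind_r]
        have hcast : (((rest.takeWhile (fun x => pvKey x == pvKey r)).length + 1 : Nat) : Int)
            = ((rest.takeWhile (fun x => pvKey x == pvKey r)).length : Int) + 1 := by push_cast; ring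
        rw [hcast]
        rfl
      have hrebase : ∀ k ∈ PySem.Set.ofList ((rest.dropWhile (fun x => pvKey x == pvKey r)).map pvKey),
          pvEmitAt ((r :: rest).map pvKey) (r :: rest) k
            = pvEmitAt ((rest.dropWhile (fun x => pvKey x == pvKey r)).map pvKey)
                (rest.dropWhile (fun x => pvKey x == pvKey r)) k := by
        intro k hk
        have hkd : k ∈ (rest.dropWhile (fun x => pvKey x == pvKey r)).map pvKey :=
          (PySem.Set.mem_ofList _ _).mp hk
        have hkne : k ≠ pvKey r := by
          rcases List.mem_map.mp hkd with ⟨z, hz, rfl⟩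
          exact fun he => hd z hz he
        have hcnt : ((r :: rest).map pvKey).count k
            = ((rest.dropWhile (fun x => pvKey x == pvKey r)).map pvKey).count k := by
          rw [hkeys_eq, List.count_cons_of_ne (Ne.symm hkne), List.count_append]
          rw [List.count_eq_zero.mpr
            (by intro hm; rcases List.mem_map.mp hm with ⟨z, hz, hzz⟩; exact hkne ((htk z hz) ▸ hzz.symm)), Nat.zero_add]
        have hfind : (r :: rest).find? (fun x => pvKey x == k)
            = (rest.dropWhile (fun x => pvKey x == pvKey r)).find? (fun x => pvKey x == k) := by
          rw [List.find?_cons_of_neg (by simpa using Ne.symm hkne)]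
          rw [show rest = rest.takeWhile (fun x => pvKey x == pvKey r)
              ++ rest.dropWhile (fun x => pvKey x == pvKey r) from hrest.symm]
          rw [List.find?_append]
          rw [List.find?_eq_none.mpr
            (by intro x hx hb; exact hkne ((htk x hx) ▸ (eq_of_beq hb).symm ▸ rfl)), Option.none_or]
          rw [hrest]
        unfold pvEmitAt
        rw [hcnt, hfind]
      have hlen' : (rest.dropWhile (fun x => pvKey x == pvKey r)).length ≤ n := by
        have := List.length_dropWhile_le (fun x => pvKey x == pvKey r) rest
        have hr : rest.length ≤ n := by simpa using Nat.succ_le_succ_iff.mp (by simpa using hlen)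
        omega
      rw [pvRunsB]
      rw [ih _ hlen' hdp, hofl, List.flatMap_cons, hemit_r,
        pv_flatMap_congr _ _ _ hrebase]

theorem pv_runs_eq (s : List (List (String × String)))
    (hp : s.Pairwise (fun a b => pvG a ≤ pvG b)) :
    pvRunsB s = (PySem.Set.ofList (s.map pvKey)).flatMap (pvEmitAt (s.map pvKey) s) :=
  pv_runs_eq_aux s.length s (le_refl _) hp

-- ----- A-side normal form (counter / display dicts unwound) -----

theorem pv_display_getD :
    ∀ (rows : List (List (String × String))) (d : PySem.Dict (String × String) (String × String))
      (k : String × String),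
      (rows.foldl (fun d r => if d.contains (pvKey r) = false then d.insert (pvKey r) (pvDisp r) else d) d).getD k ("", "")
        = if d.contains k then d.getD k ("", "")
          else ((rows.find? (fun r => pvKey r == k)).elim ("", "") pvDisp) := by
  intro rows
  induction rows with
  | nil =>
    intro d k
    simp only [List.foldl_nil, List.find?_nil, Option.elim]
    cases hc : d.contains k with
    | true => rw [if_pos rfl]
    | false => rw [if_neg (by simp), PySem.Dict.getD_of_not_contains d _ hc]
  | cons r rs ih =>
    intro d k
    rw [List.foldl_cons, List.find?_cons]
    cases hb : (pvKey r == k) with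
    | true =>
      have hk : pvKey r = k := eq_of_beq hb
      subst hk
      cases hc : d.contains (pvKey r) with
      | true =>
        rw [if_neg (by simp), ih d, hc, if_pos rfl, if_pos rfl]
      | false =>
        rw [if_pos rfl, ih _, PySem.Dict.contains_insert, hc, Bool.or_false,
          if_pos hb, PySem.Dict.getD_insert_self, Option.elim_some]
        simp
    | false =>
      have hk : pvKey r ≠ k := by intro h; rw [h] at hb; simp at hb
      have hkb : (k == pvKey r) = false := by
        cases hq : (k == pvKey r) with
        | true => exact absurd (eq_of_beq hq).symm hk
        | false => rfl
      cases hc : d.contains (pvKey r) with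
      | true => rw [if_neg (by simp), ih d]
      | false =>
        rw [if_pos rfl, ih _, PySem.Dict.contains_insert, hkb, Bool.false_or,
          PySem.Dict.getD_insert_of_ne _ _ _ (Ne.symm hk)]

theorem pv_a_split :
    ∀ (rows : List (List (String × String)))
      (c : PySem.Dict (String × String) Int) (d : PySem.Dict (String × String) (String × String)),
      rows.foldl
        (fun (st : PySem.Dict (String × String) Int × PySem.Dict (String × String) (String × String)) row =>
          let k := pvKey row
          let counter := st.1.modify k 0 (· + 1)
          let display := if st.2.contains k = false then st.2.insert k (pvDisp row) else st.2
          (counter, display)) (c, d)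
      = (rows.foldl (fun c row => c.modify (pvKey row) 0 (· + 1)) c,
         rows.foldl (fun d row => if d.contains (pvKey row) = false then d.insert (pvKey row) (pvDisp row) else d) d) := by
  intro rows
  induction rows with
  | nil => intro c d; rfl
  | cons r rs ih =>
    intro c d
    rw [List.foldl_cons, List.foldl_cons, List.foldl_cons]
    exact ih (c.modify (pvKey r) 0 (· + 1))
      (if d.contains (pvKey r) = false then d.insert (pvKey r) (pvDisp r) else d)

theorem pv_a_items (rows : List (List (String × String))) :
    (rows.foldl (fun d r => PySem.Dict.modify d (pvKey r) 0 (· + 1))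
        (PySem.Dict.empty : PySem.Dict (String × String) Int)).items
      = (PySem.Set.ofList (rows.map pvKey)).map (fun k => (k, ((rows.map pvKey).count k : Int))) := by
  have h := PySem.Dict.items_counter (κ := String × String) (rows.map pvKey)
  rw [← h, PySem.Dict.counter_eq_foldl, List.foldl_map]

theorem pv_foldl_ite_emit {α β : Type} (p : α → Prop) [DecidablePred p] (f : α → List β) :
    ∀ (l : List α) (acc : List β),
      l.foldl (fun acc x => if p x then acc else acc ++ f x) acc
        = acc ++ l.flatMap (fun x => if p x then [] else f x) := by
  intro l
  induction l with
  | nil => intro acc; simp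
  | cons x xs ih =>
    intro acc
    rw [List.foldl_cons, List.flatMap_cons]
    by_cases h : p x
    · rw [if_pos h, if_pos h, ih, List.nil_append]
    · rw [if_neg h, if_neg h, ih, List.append_assoc]

theorem pv_a_norm (rows : List (List (String × String))) :
    find_duplicate_row_identities_py rows
      = PySem.List.sorted ((PySem.Set.ofList (rows.map pvKey)).flatMap
          (pvEmitAt (rows.map pvKey) rows)) (fun x => x) false := by
  unfold find_duplicate_row_identities_py
  simp only []
  rw [pv_a_split, pv_a_items, List.foldl_map,
    pv_foldl_ite_emit (fun k : String × String => (((rows.map pvKey).count k : Int)) ≤ 1)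
      (fun k => [pvFmt ((rows.foldl (fun d row => if d.contains (pvKey row) = false then d.insert (pvKey row) (pvDisp row) else d) PySem.Dict.empty).getD k ("", "")) ((rows.map pvKey).count k : Int)])
      (PySem.Set.ofList (rows.map pvKey)) [], List.nil_append]
  refine congrArg (fun t => PySem.List.sorted t (fun x => x) false) ?_
  apply pv_flatMap_congr
  intro k _
  rw [pv_display_getD rows PySem.Dict.empty k]
  rw [show (PySem.Dict.empty : PySem.Dict (String × String) (String × String)).contains k = false from rfl,
    if_neg (show ¬(false = true) by simp)]
  unfold pvEmitAt
  by_cases h1 : (1 : Int) < ((rows.map pvKey).count k : Int)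
  · rw [if_neg (by omega), if_pos h1]
  · rw [if_pos (by omega), if_neg h1]

-- ===== VERDICT (by name: the statement is the Claim_ definition above) =====
theorem find_duplicate_row_identities_py_spec : Claim_equal_find_duplicate_row_identities_py := by
  intro rows _
  unfold Spec_find_duplicate_row_identities_py
  rw [pv_a_norm]
  unfold find_duplicate_row_identities_py_alt
  simp only []
  rw [pv_sorted2_eq]
  rw [pv_runs_eq (PySem.List.sorted rows pvG false) (PySem.List.sorted_pairwise rows pvG)]
  have hperm : (PySem.List.sorted rows pvG false).Perm rows := PySem.List.sorted_perm rows pvG false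
  have hemit : ∀ k, pvEmitAt (rows.map pvKey) rows k
      = pvEmitAt ((PySem.List.sorted rows pvG false).map pvKey) (PySem.List.sorted rows pvG false) k := by
    intro k
    have hcnt : ((PySem.List.sorted rows pvG false).map pvKey).count k = (rows.map pvKey).count k :=
      (hperm.map pvKey).count_eq k
    have hpred : (fun (r : List (String × String)) => pvKey r == k)
        = (fun y => decide (pvG y = toLex k)) := by
      funext r
      rw [Bool.beq_eq_decide_eq]
      simp [pvG]
    have hfind : (PySem.List.sorted rows pvG false).find? (fun r => pvKey r == k)
        = rows.find? (fun r => pvKey r == k) := by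
      rw [← List.head?_filter, ← List.head?_filter, hpred, pv_sorted_filter pvG (toLex k) rows]
    unfold pvEmitAt
    rw [hcnt, hfind]
  have hkeys : (PySem.Set.ofList (rows.map pvKey)).Perm
      (PySem.Set.ofList ((PySem.List.sorted rows pvG false).map pvKey)) := by
    refine (List.perm_ext_iff_of_nodup (PySem.Set.nodup_ofList _) (PySem.Set.nodup_ofList _)).mpr ?_
    intro a
    rw [PySem.Set.mem_ofList, PySem.Set.mem_ofList]
    exact ((hperm.map pvKey).mem_iff).symm
  exact (PySem.List.sorted_id_eq_sorted_id_iff_perm _ _).mpr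
    (List.Perm.flatMap hkeys (fun a _ => by rw [hemit a]))
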